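-- pv_equiv track=rewrite | github.com/peterchudik/advent_of_code_2024 | day_04/day_04.py | get_verticals
-- ===== SOURCE A (Python) =====
-- def get_verticals(field):
--     """
--     transpose field -> columns become lines
--     """
--     number_of_lines = len(field)
--     number_of_columns = len(field[0])
--
--     result = []
--
--     for column in range(0,number_of_columns):
--         result_line = []
--         for line in range(0, number_of_lines):
--             result_line.append(field[line][column])
--         result.append(list(reversed(result_line)))
--
--     return result
-- ===== SOURCE B (Python) =====
-- def get_verticals(field):
--     """
--     transpose field -> columns become lines (read bottom-up):
--     one pass over the rows, bottom row first, distributing each cell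
--     into its column's accumulator.
--     """
--     number_of_columns = len(field[0])
--     cols = [[] for _ in range(number_of_columns)]
--     for row in reversed(field):
--         for c in range(number_of_columns):
--             cols[c].append(row[c])
--     return cols
-- ===== Notes on version B (the rewrite author's own statement) =====
-- stated objective: alternative
-- what changed: B replaces A's column-by-column gather (inner scan over all rows per column, then reversing each gathered line) by a single pass over the rows in reversed order that distributes each cell into preallocated per-column accumulators, so no reversal step is needed.
import Mathlib
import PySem

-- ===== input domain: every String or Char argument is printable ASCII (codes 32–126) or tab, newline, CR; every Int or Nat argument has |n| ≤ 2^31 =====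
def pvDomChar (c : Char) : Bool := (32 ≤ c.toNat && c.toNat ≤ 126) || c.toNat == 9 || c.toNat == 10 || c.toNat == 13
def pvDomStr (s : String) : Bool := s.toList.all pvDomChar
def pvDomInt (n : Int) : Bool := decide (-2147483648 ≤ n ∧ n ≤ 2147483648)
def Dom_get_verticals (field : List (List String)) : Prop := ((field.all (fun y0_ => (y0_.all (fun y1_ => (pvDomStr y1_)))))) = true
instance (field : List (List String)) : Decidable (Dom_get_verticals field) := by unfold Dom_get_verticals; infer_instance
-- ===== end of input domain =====

-- B distributes the cells of each row (bottom row first) into per-column accumulators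
-- in one pass, instead of A's per-column gather-then-reverse; same cost, different decomposition.

-- ===== PORT A =====
def get_verticals (field : List (List String)) : List (List String) :=
  let numberOfLines : Int := field.length
  let numberOfColumns : Int := (PySem.List.pyGetD field 0 []).length
  (PySem.List.pyRange 0 numberOfColumns 1).foldl (fun result column =>
    let resultLine := (PySem.List.pyRange 0 numberOfLines 1).foldl
      (fun rl line => rl ++ [PySem.List.pyGetD (PySem.List.pyGetD field line []) column ""]) []
    result ++ [resultLine.reverse]) []

-- ===== PORT B =====
def get_verticals_alt (field : List (List String)) : List (List String) :=
  let numberOfColumns : Int := (PySem.List.pyGetD field 0 []).length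
  let cols0 : List (List String) := (PySem.List.pyRange 0 numberOfColumns 1).map (fun _ => [])
  field.reverse.foldl (fun cols row =>
    (PySem.List.pyRange 0 numberOfColumns 1).foldl
      -- cols[c].append(row[c]); c ranges over range(0, numberOfColumns) so 0 ≤ c and c.toNat is exact
      (fun cols c => cols.modify c.toNat (fun col => col ++ [PySem.List.pyGetD row c ""])) cols) cols0

-- ===== PRECONDITION & SPEC =====
-- Pre_ excludes exactly the inputs on which the Python A raises IndexError: the empty field
-- (len(field[0]) fails) and fields with a row shorter than the first row (field[line][column] fails).
def Pre_get_verticals (field : List (List String)) : Prop :=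
  field ≠ [] ∧ ∀ row ∈ field, (field.headD []).length ≤ row.length
instance (field : List (List String)) : Decidable (Pre_get_verticals field) := by
  unfold Pre_get_verticals; infer_instance
def pvWitness_get_verticals : List (List String) := [["a", "b"], ["c", "d"]]

def Spec_get_verticals (field : List (List String)) (out : List (List String)) : Prop := out = get_verticals_alt field
instance (field : List (List String)) (out : List (List String)) : Decidable (Spec_get_verticals field out) := by unfold Spec_get_verticals; infer_instance

-- ===== CLAIM (what is proved, stated in full; the proofs are below) =====
def Claim_equal_get_verticals : Prop := ∀ (field : List (List String)), Dom_get_verticals field → Pre_get_verticals field → Spec_get_verticals field (get_verticals field)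

-- ===== LEMMAS AND PROOFS =====

-- A's result: one gathered-then-reversed line per column.
theorem getv_A_char (field : List (List String)) :
    get_verticals field =
      (List.range (field.getD 0 []).length).map (fun c =>
        ((List.range field.length).map (fun l => (field.getD l []).getD c "")).reverse) := by
  simp only [get_verticals, PySem.List.pyRange_one, Int.sub_zero, Int.toNat_natCast, zero_add,
    PySem.List.pyGetD_zero, List.foldl_map, PySem.List.pyGetD_natCast,
    PySem.List.foldl_append_singleton_eq_map, List.nil_append]

-- modifying one slot of a range-tabulated list re-tabulates it with an if.
theorem modify_map_range {α : Type} (f : Nat → α) (m c : Nat) (g : α → α) :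
    ((List.range m).map f).modify c g
      = (List.range m).map (fun i => if i = c then g (f i) else f i) := by
  apply List.ext_getElem
  · simp
  · intro i h1 h2
    simp only [List.getElem_modify, List.getElem_map, List.getElem_range]
    by_cases h : i = c
    · simp [h]
    · rw [if_neg h, if_neg (fun hc => h hc.symm)]

-- B's inner loop: appending row[c] to every column accumulator of a tabulated list.
theorem getv_inner (m : Nat) (f : Nat → List String) (g : Nat → String) :
    (List.range m).foldl (fun cols c => cols.modify c (fun col => col ++ [g c]))
        ((List.range m).map f)
      = (List.range m).map (fun c => f c ++ [g c]) := by
  suffices h : ∀ k,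
      (List.range k).foldl (fun cols c => cols.modify c (fun col => col ++ [g c]))
        ((List.range m).map f)
      = (List.range m).map (fun i => if i < k then f i ++ [g i] else f i) by
    rw [h m]
    apply List.map_congr_left
    intro i hi
    simp only [List.mem_range] at hi
    simp [hi]
  intro k
  induction k with
  | zero => simp
  | succ k ih =>
    rw [List.range_succ, List.foldl_append, ih]
    simp only [List.foldl_cons, List.foldl_nil]
    rw [modify_map_range]
    apply List.map_congr_left
    intro i _
    rcases lt_trichotomy i k with h | h | h
    · simp [show i ≠ k by omega, h, show i < k + 1 by omega]
    · subst h
      simp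
    · simp [show i ≠ k by omega, show ¬ i < k by omega, show ¬ i < k + 1 by omega]

-- B's outer loop invariant: after consuming `rows`, column c holds f c ++ the c-cells of rows.
theorem getv_outer (rows : List (List String)) (m : Nat) (f : Nat → List String) :
    rows.foldl (fun cols row =>
        (List.range m).foldl
          (fun cols c => cols.modify c (fun col => col ++ [row.getD c ""])) cols)
        ((List.range m).map f)
      = (List.range m).map (fun c => f c ++ rows.map (fun row => row.getD c "")) := by
  induction rows generalizing f with
  | nil => simp
  | cons r rs ih =>
    simp only [List.foldl_cons]
    rw [getv_inner m f (fun c => r.getD c ""), ih]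
    simp [List.append_assoc]

-- tabulating a list by index equals mapping over it.
theorem map_range_getD {α β : Type} (l : List α) (g : α → β) (d : α) :
    (List.range l.length).map (fun i => g (l.getD i d)) = l.map g := by
  apply List.ext_getElem
  · simp
  · intro i h1 h2
    simp at h1
    simp [List.getD_eq_getElem?_getD, List.getElem?_eq_getElem h1]

-- B's result.
theorem getv_B_char (field : List (List String)) :
    get_verticals_alt field =
      (List.range (field.getD 0 []).length).map (fun c =>
        field.reverse.map (fun row => row.getD c "")) := by
  have h : get_verticals_alt field =
      field.reverse.foldl (fun cols row =>
        (List.range (field.getD 0 []).length).foldl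
          (fun cols c => cols.modify c (fun col => col ++ [row.getD c ""])) cols)
        ((List.range (field.getD 0 []).length).map (fun _ => ([] : List String))) := by
    simp only [get_verticals_alt, PySem.List.pyRange_one, Int.sub_zero, Int.toNat_natCast,
      zero_add, PySem.List.pyGetD_zero, List.foldl_map, List.map_map, Function.comp_def,
      PySem.List.pyGetD_natCast]
  rw [h, getv_outer]
  simp

-- ===== VERDICT (by name: the statement is the Claim_ definition above) =====
theorem get_verticals_spec : Claim_equal_get_verticals := by
  intro field _ _
  unfold Spec_get_verticals
  rw [getv_A_char, getv_B_char]
  apply List.map_congr_left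
  intro c _
  rw [map_range_getD field (fun row => row.getD c "") [], List.map_reverse]
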